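-- pv_equiv track=rewrite | github.com/thepowerfuldeez/Tasks | Contests/Open programming contest/a_old.py | solution
-- ===== SOURCE A (Python) =====
-- from itertools import combinations, product
--
-- def solution(n, k):
--     x = n // k
--
--     a = list(range(1, n + 1))
--     b = [a[i:i + k] for i in range(0, n, k)]
--     c = [a[i:n:x] for i in range(x)]
--
--     count = 0
--
--     for p in product(b, c):
--         for l in product(combinations(p[0], 2), combinations(p[1], 2)):
--             if len(set(l[0]) & set(l[1])) == 2:
--                 count += 1
--
--     return count
-- ===== SOURCE B (Python) =====
-- def solution(n, k):
--     # Count pairs {u,v} from 1..n lying in the same k-block (a[i:i+k]) and the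
--     # same stride-x column (x = n//k), by a closed-form count per block length.
--     x = n // k
--     if n <= 0 or k <= 0 or x <= 0:
--         return 0
--
--     def pairs_in_block(length):
--         # sum over the x residue classes of C(size, 2), where the sizes of the
--         # residue classes of an interval of `length` elements are m+1 (s times)
--         # and m (x-s times), with m, s = divmod(length, x)
--         m, s = divmod(length, x)
--         return s * m * (m + 1) // 2 + (x - s) * m * (m - 1) // 2
--
--     return x * pairs_in_block(k) + pairs_in_block(n % k)
-- ===== Notes on version B (the rewrite author's own statement) =====
-- stated objective: faster
-- what changed: Replaces A's brute-force enumeration of all (row-block, column, pair-of-pairs) combinations with a closed-form count: for a block of length L the number of pairs lying in the same stride-x column is s*C(m+1,2)+(x-s)*C(m,2) with m,s = divmod(L,x), so the answer is x*f(k) + f(n%k).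
import Mathlib
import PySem

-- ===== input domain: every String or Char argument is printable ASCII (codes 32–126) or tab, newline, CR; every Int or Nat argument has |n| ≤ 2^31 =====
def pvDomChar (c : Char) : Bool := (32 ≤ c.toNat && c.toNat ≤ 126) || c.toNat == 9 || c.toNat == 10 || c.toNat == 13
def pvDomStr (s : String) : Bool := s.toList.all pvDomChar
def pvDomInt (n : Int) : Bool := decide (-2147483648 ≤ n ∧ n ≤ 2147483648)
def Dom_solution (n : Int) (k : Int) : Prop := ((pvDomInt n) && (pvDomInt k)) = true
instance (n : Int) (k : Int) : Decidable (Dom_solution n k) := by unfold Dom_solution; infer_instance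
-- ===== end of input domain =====

-- B replaces A's enumeration of all (block, column, pair, pair) combinations by a
-- closed-form count per block length; proved equal to A on all k ≠ 0 (A raises ZeroDivisionError at k = 0).

-- ===== PORT A =====
def solution (n : Int) (k : Int) : Int :=
  let x := PySem.Int.floordiv n k
  let a := PySem.List.pyRange 1 (n + 1) 1
  let b := (PySem.List.pyRange 0 n k).map (fun i => PySem.List.slice a (some i) (some (i + k)))
  -- a[i:n:x]: slice? is none only when x = 0, but then range(x) is empty and the body never runs
  let c := (PySem.List.pyRange 0 x 1).map (fun i => (PySem.List.slice? a (some i) (some n) x).getD [])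
  let prod_bc := b.flatMap (fun bi => c.map (fun ci => (bi, ci)))
  prod_bc.foldl (fun count p =>
    ((PySem.List.combinations p.1 2).flatMap (fun u => (PySem.List.combinations p.2 2).map (fun v => (u, v)))).foldl
      (fun count l =>
        if PySem.Set.len (PySem.Set.inter (PySem.Set.ofList l.1) (PySem.Set.ofList l.2)) = 2 then count + 1
        else count)
      count) 0

-- ===== PORT B =====
def solution_alt (n : Int) (k : Int) : Int :=
  let x := PySem.Int.floordiv n k
  if n ≤ 0 ∨ k ≤ 0 ∨ x ≤ 0 then 0
  else
    let f : Int → Int := fun len =>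
      let m := PySem.Int.floordiv len x
      let s := PySem.Int.mod len x
      PySem.Int.floordiv (s * m * (m + 1)) 2 + PySem.Int.floordiv ((x - s) * m * (m - 1)) 2
    x * f k + f (PySem.Int.mod n k)

-- ===== PRECONDITION & SPEC =====
-- A raises ZeroDivisionError exactly when k = 0 (at n // k); nothing else is excluded.
def Pre_solution (n : Int) (k : Int) : Prop := k ≠ 0
instance (n : Int) (k : Int) : Decidable (Pre_solution n k) := by unfold Pre_solution; infer_instance
def pvWitness_solution : Int × Int := (10, 3)

def Spec_solution (n : Int) (k : Int) (out : Int) : Prop := out = solution_alt n k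
instance (n : Int) (k : Int) (out : Int) : Decidable (Spec_solution n k out) := by unfold Spec_solution; infer_instance

-- ===== CLAIM (what is proved, stated in full; the proofs are below) =====
def Claim_equal_solution : Prop := ∀ (n : Int) (k : Int), Dom_solution n k → Pre_solution n k → Spec_solution n k (solution n k)

-- ===== LEMMAS AND PROOFS =====

-- the inner double loop's count for one (block, column) pair
def pvN (B C : List Int) : Nat :=
  ((PySem.List.combinations B 2).flatMap (fun u => (PySem.List.combinations C 2).map (fun v => (u, v)))).countP
    (fun l => decide (PySem.Set.len (PySem.Set.inter (PySem.Set.ofList l.1) (PySem.Set.ofList l.2)) = 2))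

-- number of v in [lo, hi) with v ≡ r (mod x)
def cntZ (lo hi r x : Int) : Nat :=
  (PySem.List.pyRange lo hi 1).countP (fun v => decide (x ∣ (v - r)))

-- sum of d / X over d < L
def gN (L X : Nat) : Nat := ((List.range L).map (· / X)).sum

theorem pv_sum_flatMap {α : Type} (l : List α) (f : α → List Int) :
    (l.flatMap f).sum = (l.map (fun a => (f a).sum)).sum := by
  induction l with
  | nil => rfl
  | cons a t ih => simp [List.flatMap_cons, ih]

theorem sol_eq_sum (n k : Int) :
    solution n k =
      (((PySem.List.pyRange 0 n k).map
          (fun i => PySem.List.slice (PySem.List.pyRange 1 (n + 1) 1) (some i) (some (i + k)))).map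
        (fun B =>
          (((PySem.List.pyRange 0 (PySem.Int.floordiv n k) 1).map
              (fun j => (PySem.List.slice? (PySem.List.pyRange 1 (n + 1) 1) (some j) (some n)
                  (PySem.Int.floordiv n k)).getD [])).map
            (fun C => (pvN B C : Int))).sum)).sum := by
  simp only [solution]
  refine Eq.trans (PySem.List.foldl_congr_mem _ _
    (fun (count : Int) (p : List Int × List Int) => count + (pvN p.1 p.2 : Int)) _ ?_) ?_
  · intro acc p _
    exact PySem.List.foldl_ite_add_one _ _ acc
  · rw [PySem.List.foldl_add, zero_add, List.map_flatMap, pv_sum_flatMap]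
    simp only [List.map_map, Function.comp_def]

theorem set2_len_eq_two_iff {u1 u2 v1 v2 : Int} (h1 : u1 < u2) (h2 : v1 < v2) :
    (PySem.Set.len (PySem.Set.inter (PySem.Set.ofList [u1, u2]) (PySem.Set.ofList [v1, v2])) = 2)
      ↔ (u1 = v1 ∧ u2 = v2) := by
  have hne1 : u2 ≠ u1 := ne_of_gt h1
  have hne2 : v2 ≠ v1 := ne_of_gt h2
  have hu : PySem.Set.ofList [u1, u2] = [u1, u2] := by
    simp [PySem.Set.ofList, PySem.Set.add, PySem.Set.contains, PySem.Set.empty, hne1]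
  have hv : PySem.Set.ofList [v1, v2] = [v1, v2] := by
    simp [PySem.Set.ofList, PySem.Set.add, PySem.Set.contains, PySem.Set.empty, hne2]
  rw [hu, hv]
  simp only [PySem.Set.inter, PySem.Set.len, PySem.Set.contains]
  rw [List.filter_cons, List.filter_cons, List.filter_nil]
  by_cases e11 : u1 = v1 <;> by_cases e12 : u1 = v2 <;>
    by_cases e21 : u2 = v1 <;> by_cases e22 : u2 = v2 <;>
    simp [e11, e12, e21, e22, List.contains_cons] <;> omega

theorem combos2_mem_shape {B : List Int} (hB : B.Pairwise (· < ·)) {u : List Int}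
    (hu : u ∈ PySem.List.combinations B 2) :
    ∃ u1 u2, u = [u1, u2] ∧ u1 < u2 ∧ u1 ∈ B ∧ u2 ∈ B := by
  obtain ⟨hsub, hlen⟩ := (PySem.List.mem_combinations_iff B 2 u).mp hu
  obtain ⟨u1, u2, rfl⟩ := List.length_eq_two.mp hlen
  have hp := List.Pairwise.sublist hsub hB
  rcases List.pairwise_cons.mp hp with ⟨h12, _⟩
  exact ⟨u1, u2, rfl, h12 u2 (by simp), hsub.subset (by simp), hsub.subset (by simp)⟩

theorem count_pair_map (c u1 u2 : Int) (C : List Int) :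
    ((C.map (fun y => [c, y])).count [u1, u2]) = if c = u1 then C.count u2 else 0 := by
  induction C with
  | nil => simp
  | cons y C ih =>
    rw [List.map_cons, List.count_cons, ih, List.count_cons]
    by_cases hc : c = u1 <;> by_cases hy : y = u2 <;>
      simp [hc, hy] <;> omega

theorem count_combos2 {C : List Int} (hC : C.Pairwise (· < ·)) {u1 u2 : Int} (h : u1 < u2) :
    (PySem.List.combinations C 2).count [u1, u2] = if u1 ∈ C ∧ u2 ∈ C then 1 else 0 := by
  induction C with
  | nil =>
    rw [show (2:Nat) = 1 + 1 from rfl, PySem.List.combinations_nil_succ]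
    simp
  | cons c C ih =>
    rcases List.pairwise_cons.mp hC with ⟨hc, hC'⟩
    have hnodup : C.Nodup := hC'.imp (fun hlt => ne_of_lt hlt)
    rw [show (2:Nat) = 1 + 1 from rfl, PySem.List.combinations_cons_succ,
      PySem.List.combinations_one, List.count_append, List.map_map,
      show (1 + 1 : Nat) = 2 from rfl]
    have hmm : ((fun c' => c :: c') ∘ fun y => [y]) = fun y => [c, y] := by
      funext y; rfl
    rw [hmm, count_pair_map, ih hC']
    by_cases hcu : c = u1
    · subst hcu
      have hu1 : c ∉ C := fun hmem => absurd (hc c hmem) (lt_irrefl c)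
      have hu2c : u2 ≠ c := ne_of_gt h
      by_cases hu2 : u2 ∈ C
      · rw [List.count_eq_one_of_mem hnodup hu2]
        simp [hu1, hu2, hu2c]
      · rw [List.count_eq_zero_of_not_mem hu2]
        simp [hu1, hu2, hu2c]
    · have hu1cc : u1 ≠ c := fun h' => hcu h'.symm
      have hcC : c ∉ C := fun hmem => absurd (hc c hmem) (lt_irrefl c)
      by_cases hu2c : u2 = c
      · have hu1C : u1 ∉ C := fun hmem => absurd (hc u1 hmem) (by omega)
        simp [hcu, hu1cc, hu1C, hcC, hu2c]
      · simp [hcu, hu1cc, hu2c]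

theorem countP_all_combos2 (q : Int → Bool) (B : List Int) :
    (PySem.List.combinations B 2).countP (fun u => u.all q)
      = (PySem.List.combinations (B.filter q) 2).length := by
  induction B with
  | nil =>
    rw [show (2:Nat) = 1 + 1 from rfl, PySem.List.combinations_nil_succ]
    simp [PySem.List.combinations_nil_succ]
  | cons x B ih =>
    rw [show (2:Nat) = 1 + 1 from rfl, PySem.List.combinations_cons_succ,
      List.countP_append, PySem.List.combinations_one,
      show (1 + 1 : Nat) = 2 from rfl]
    rw [List.countP_map, List.countP_map]
    simp only [Function.comp_def, List.all_cons, List.all_nil, Bool.and_true]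
    by_cases hq : q x
    · rw [List.filter_cons_of_pos hq,
        show (2:Nat) = 1 + 1 from rfl, PySem.List.combinations_cons_succ,
        List.length_append, List.length_map, PySem.List.combinations_one, List.length_map,
        show (1 + 1 : Nat) = 2 from rfl, ih]
      have hfirst : B.countP (fun y => q x && q y) = (B.filter q).length := by
        rw [← List.countP_eq_length_filter]
        apply List.countP_congr
        intro y _
        simp [hq]
      omega
    · rw [List.filter_cons_of_neg hq, ih]
      have hzero : B.countP (fun y => q x && q y) = 0 := by
        apply List.countP_eq_zero.mpr
        intro y _
        simp [hq]
      omega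

theorem length_combos2 (B : List Int) :
    (PySem.List.combinations B 2).length = B.length.choose 2 := by
  induction B with
  | nil =>
    rw [show (2:Nat) = 1 + 1 from rfl, PySem.List.combinations_nil_succ]
    simp
  | cons x B ih =>
    rw [show (2:Nat) = 1 + 1 from rfl, PySem.List.combinations_cons_succ,
      List.length_append, List.length_map, PySem.List.combinations_one, List.length_map]
    rw [show (1 + 1 : Nat) = 2 from rfl] at *
    rw [ih, List.length_cons, Nat.choose_succ_succ, Nat.choose_one_right]

theorem sum_map_ite_nat {α : Type} (p : α → Bool) (l : List α) :
    (l.map (fun a => if p a = true then 1 else 0)).sum = l.countP p := by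
  induction l with
  | nil => simp
  | cons a t ih =>
    rw [List.map_cons, List.sum_cons, ih, List.countP_cons]
    by_cases h : p a <;> simp [h] <;> omega

theorem pvN_eq_choose {B C : List Int} (hB : B.Pairwise (· < ·)) (hC : C.Pairwise (· < ·)) :
    pvN B C = ((B.filter (fun v => decide (v ∈ C))).length).choose 2 := by
  unfold pvN
  rw [List.countP_flatMap]
  have hmap : ∀ u ∈ PySem.List.combinations B 2,
      ((List.countP (fun l => decide (PySem.Set.len (PySem.Set.inter (PySem.Set.ofList l.1)
          (PySem.Set.ofList l.2)) = 2))) ∘ (fun u => (PySem.List.combinations C 2).map (fun v => (u, v)))) u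
        = (if (fun u : List Int => u.all (fun v => decide (v ∈ C))) u = true then 1 else 0) := by
    intro u hu
    obtain ⟨u1, u2, rfl, h12, hu1B, hu2B⟩ := combos2_mem_shape hB hu
    simp only [Function.comp_apply, List.countP_map]
    have hcongr : ∀ v ∈ PySem.List.combinations C 2,
        (((fun l : List Int × List Int => decide (PySem.Set.len (PySem.Set.inter (PySem.Set.ofList l.1)
            (PySem.Set.ofList l.2)) = 2)) ∘ (fun v => ([u1, u2], v))) v = true)
          ↔ ((fun v => v == [u1, u2]) v = true) := by
      intro v hv
      obtain ⟨v1, v2, rfl, h34, _, _⟩ := combos2_mem_shape hC hv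
      show (decide (PySem.Set.len (PySem.Set.inter (PySem.Set.ofList [u1, u2])
          (PySem.Set.ofList [v1, v2])) = 2) = true) ↔ (([v1, v2] == [u1, u2]) = true)
      rw [decide_eq_true_eq, beq_iff_eq, set2_len_eq_two_iff h12 h34]
      constructor
      · rintro ⟨rfl, rfl⟩; rfl
      · intro hv'
        injection hv' with e1 e2
        injection e2 with e2 _
        exact ⟨e1.symm, e2.symm⟩
    rw [List.countP_congr hcongr]
    rw [show List.countP (fun v => v == [u1, u2]) (PySem.List.combinations C 2)
        = (PySem.List.combinations C 2).count [u1, u2] from rfl]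
    rw [count_combos2 hC h12]
    by_cases hmem : u1 ∈ C ∧ u2 ∈ C
    · simp [hmem.1, hmem.2]
    · rw [if_neg hmem]
      rcases not_and_or.mp hmem with hm | hm <;> simp [hm]
  rw [List.map_congr_left hmap, sum_map_ite_nat, countP_all_combos2, length_combos2]

theorem drop_pyRange (lo hi : Int) (j : Nat) :
    (PySem.List.pyRange lo hi 1).drop j = PySem.List.pyRange (lo + j) hi 1 := by
  induction j generalizing lo with
  | zero => simp
  | succ j ih =>
    by_cases h : lo < hi
    · rw [PySem.List.pyRange_one_cons h, List.drop_succ_cons, ih (lo + 1)]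
      congr 1
      push_cast
      ring
    · rw [PySem.List.pyRange_one_eq_nil (le_of_not_gt h),
        PySem.List.pyRange_one_eq_nil (by push_cast; omega)]
      simp

theorem take_pyRange (lo hi : Int) (j : Nat) :
    (PySem.List.pyRange lo hi 1).take j = PySem.List.pyRange lo (min hi (lo + j)) 1 := by
  induction j generalizing lo with
  | zero =>
    rw [List.take_zero]
    symm
    apply PySem.List.pyRange_one_eq_nil
    omega
  | succ j ih =>
    by_cases h : lo < hi
    · have hm : min hi (lo + ((j + 1 : Nat) : Int)) = min hi ((lo + 1) + (j : Nat)) := by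
        push_cast; omega
      rw [PySem.List.pyRange_one_cons h, List.take_succ_cons, ih (lo + 1), hm,
        PySem.List.pyRange_one_cons (show lo < min hi ((lo + 1) + ((j : Nat) : Int)) by omega)]
    · rw [PySem.List.pyRange_one_eq_nil (le_of_not_gt h),
        PySem.List.pyRange_one_eq_nil (by omega)]
      simp

theorem block_eq (n k i : Int) (h0 : 0 ≤ i) (hk : 0 < k) :
    PySem.List.slice (PySem.List.pyRange 1 (n + 1) 1) (some i) (some (i + k))
      = PySem.List.pyRange (1 + i) (min (n + 1) (1 + i + k)) 1 := by
  rw [PySem.List.slice_toNat _ h0 (by omega), drop_pyRange, take_pyRange]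
  have h1 : (1 : Int) + (i.toNat : Int) = 1 + i := by omega
  have h2 : (((i + k).toNat - i.toNat : Nat) : Int) = k := by omega
  rw [h1, h2]

theorem pairwise_pyRange_pos {s : Int} (hs : 0 < s) (a b : Int) :
    (PySem.List.pyRange a b s).Pairwise (· < ·) := by
  rw [PySem.List.pyRange_of_pos a b hs]
  refine List.Pairwise.map _ ?_ List.pairwise_lt_range
  intro p q hpq
  have hc : (p : Int) < (q : Int) := by exact_mod_cast hpq
  have := mul_lt_mul_of_pos_left hc hs
  omega

theorem pv_filterMap_eq_map {α β : Type} (f : α → Option β) (g : α → β) (l : List α)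
    (h : ∀ a ∈ l, f a = some (g a)) : l.filterMap f = l.map g := by
  induction l with
  | nil => rfl
  | cons a t ih =>
    rw [List.filterMap_cons, h a (by simp), List.map_cons,
      ih (fun a ha => h a (by simp [ha]))]

theorem c_eq (n x j : Int) (hx : 0 < x) (hxn : x ≤ n) (hj0 : 0 ≤ j) (hjx : j < x) :
    (PySem.List.slice? (PySem.List.pyRange 1 (n + 1) 1) (some j) (some n) x).getD []
      = PySem.List.pyRange (j + 1) (n + 1) x := by
  have hxne : x ≠ 0 := by omega
  have hn0 : (0:Int) ≤ n := by omega
  have hcast : ((n.toNat : Int)) = n := Int.toNat_of_nonneg hn0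
  have hlen : (PySem.List.pyRange 1 (n + 1) 1).length = n.toNat := by
    rw [PySem.List.length_pyRange_one]
    omega
  simp only [PySem.List.slice?, PySem.List.sliceIndices, hlen, hcast]
  rw [if_neg hxne, if_neg (by omega : ¬ x < 0), if_neg (by omega : ¬ x < 0),
    if_neg (by omega : ¬ j < 0), if_neg (by omega : ¬ n < 0),
    min_eq_left (by omega : j ≤ n), min_self,
    if_pos hx, if_pos (by omega : j < n), Option.getD_some]
  rw [PySem.List.pyRange_of_pos (j + 1) (n + 1) hx, if_pos (by omega : j + 1 < n + 1),
    show n + 1 - (j + 1) + x - 1 = n - j + x - 1 by ring]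
  apply pv_filterMap_eq_map
  intro t ht
  have ht' : t < ((n - j + x - 1) / x).toNat := List.mem_range.mp ht
  have hnn : 0 ≤ (n - j + x - 1) / x := Int.ediv_nonneg (by omega) (by omega)
  have htc : ((t:Int) + 1) ≤ (n - j + x - 1) / x := by omega
  have hb := (Int.le_ediv_iff_mul_le hx).mp htc
  rw [add_mul, one_mul, mul_comm] at hb
  have hxt0 : (0:Int) ≤ x * t := by positivity
  rw [PySem.List.getElem?_pyRange_one]
  rw [if_pos (by omega : (j + x * (t:Int)).toNat < (n + 1 - 1).toNat)]
  congr 1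
  omega

theorem cntZ_congr_mod {lo hi r r' x : Int} (h : x ∣ (r - r')) :
    cntZ lo hi r x = cntZ lo hi r' x := by
  unfold cntZ
  apply List.countP_congr
  intro v _
  simp only [decide_eq_true_eq]
  constructor <;> intro hd
  · have hv : v - r' = (v - r) + (r - r') := by ring
    rw [hv]; exact dvd_add hd h
  · have hv : v - r = (v - r') - (r - r') := by ring
    rw [hv]; exact dvd_sub hd h

theorem cntZ_top {x : Int} (hx : 0 < x) (L : Nat) :
    ∀ lo : Int, cntZ lo (lo + L) (lo + L) x = L / x.toNat := by
  induction L with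
  | zero =>
    intro lo
    simp [cntZ, PySem.List.pyRange_one_eq_nil (by omega : lo + ((0:Nat):Int) ≤ lo)]
  | succ L ih =>
    intro lo
    unfold cntZ
    rw [PySem.List.pyRange_one_cons (by push_cast; omega), List.countP_cons]
    have hdvd : (x ∣ (lo - (lo + ((L + 1 : Nat) : Int)))) ↔ (x.toNat ∣ (L + 1)) := by
      have h1 : lo - (lo + ((L + 1 : Nat) : Int)) = -((L + 1 : Nat) : Int) := by push_cast; ring
      have h2 : ((x.toNat : Int)) = x := Int.toNat_of_nonneg hx.le
      rw [h1, dvd_neg]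
      constructor
      · intro hc
        exact_mod_cast h2 ▸ hc
      · intro hc
        exact_mod_cast h2 ▸ (Int.natCast_dvd_natCast.mpr hc)
    have htail : (PySem.List.pyRange (lo + 1) (lo + ((L + 1 : Nat) : Int)) 1).countP
        (fun v => decide (x ∣ (v - (lo + ((L + 1 : Nat) : Int))))) = L / x.toNat := by
      have hshift : lo + ((L + 1 : Nat) : Int) = (lo + 1) + (L : Nat) := by push_cast; ring
      rw [hshift]
      exact ih (lo + 1)
    rw [htail, Nat.succ_div]
    by_cases hd : x.toNat ∣ (L + 1)
    · rw [if_pos hd, if_pos (decide_eq_true (hdvd.mpr hd))]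
    · rw [if_neg hd, if_neg (by simp only [decide_eq_true_eq]; exact fun hc => hd (hdvd.mp hc))]

theorem filter_mem_c (n x lo hi j : Int) (hx : 0 < x) (hlo : 1 ≤ lo) (hhi : hi ≤ n + 1)
    (_hj0 : 0 ≤ j) (hjx : j < x) :
    ((PySem.List.pyRange lo hi 1).filter
        (fun v => decide (v ∈ PySem.List.pyRange (j + 1) (n + 1) x))).length
      = cntZ lo hi (j + 1) x := by
  unfold cntZ
  rw [← List.countP_eq_length_filter]
  apply List.countP_congr
  intro v hv
  have hv' := PySem.List.mem_pyRange_one.mp hv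
  simp only [decide_eq_true_eq]
  rw [PySem.List.mem_pyRange_iff_of_pos hx]
  constructor
  · rintro ⟨_, _, hd⟩
    exact hd
  · intro hd
    refine ⟨?_, by omega, hd⟩
    rcases hd with ⟨t, ht⟩
    by_cases h0 : 0 ≤ t
    · have := mul_nonneg hx.le h0
      omega
    · have h1 : t ≤ -1 := by omega
      have h2 : x * t ≤ x * (-1) := mul_le_mul_of_nonneg_left h1 hx.le
      omega

theorem sum_ite_single {l : List Int} (hn : l.Nodup) (j0 : Int) (δ : Int) :
    (l.map (fun j => if j = j0 then δ else 0)).sum = if j0 ∈ l then δ else 0 := by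
  induction l with
  | nil => simp
  | cons a t ih =>
    rcases List.nodup_cons.mp hn with ⟨ha, ht⟩
    rw [List.map_cons, List.sum_cons, ih ht]
    by_cases h : a = j0
    · subst h
      simp [ha]
    · simp [h, Ne.symm h]

theorem choose2_succ (m : Nat) : (m + 1).choose 2 = m.choose 2 + m := by
  rw [show (2:Nat) = 1 + 1 from rfl, Nat.choose_succ_succ m 1, Nat.choose_one_right,
    show Nat.succ 1 = 1 + 1 from rfl]
  omega

theorem S_eq_g (x : Int) (hx : 0 < x) (L : Nat) (lo : Int) :
    ((PySem.List.pyRange 0 x 1).map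
        (fun j => (((cntZ lo (lo + L) (j + 1) x).choose 2 : Nat) : Int))).sum
      = ((gN L x.toNat : Nat) : Int) := by
  induction L with
  | zero =>
    have hz : ∀ j ∈ PySem.List.pyRange 0 x 1,
        ((((cntZ lo (lo + ((0:Nat):Int)) (j + 1) x).choose 2 : Nat)) : Int) = (0 : Int) := by
      intro j _
      have hc : cntZ lo (lo + ((0:Nat):Int)) (j + 1) x = 0 := by
        unfold cntZ
        rw [PySem.List.pyRange_one_eq_nil (by omega)]
        rfl
      rw [hc]
      rfl
    rw [List.map_congr_left hz]
    simp [gN]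
  | succ L ih =>
    have hL1 : lo + ((L + 1 : Nat) : Int) = (lo + (L:Nat)) + 1 := by push_cast; ring
    set j0 : Int := (lo + (L:Nat) - 1) % x with hj0def
    have hj00 : 0 ≤ j0 := Int.emod_nonneg _ (by omega)
    have hj0x : j0 < x := Int.emod_lt_of_pos _ hx
    have hkey : ∀ j : Int, 0 ≤ j → j < x → ((x ∣ (lo + (L:Nat)) - (j + 1)) ↔ j = j0) := by
      intro j h0 h1
      constructor
      · rintro ⟨t, ht⟩
        have hrw : lo + (L:Nat) - 1 = j + x * t := by omega
        rw [hj0def, hrw, Int.add_mul_emod_self_left, Int.emod_eq_of_lt h0 h1]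
      · rintro rfl
        refine ⟨(lo + (L:Nat) - 1) / x, ?_⟩
        have := Int.emod_def (lo + (L:Nat) - 1) x
        omega
    have hsplit : ∀ j : Int, 0 ≤ j → j < x →
        cntZ lo (lo + ((L + 1 : Nat) : Int)) (j + 1) x
          = cntZ lo (lo + (L:Nat)) (j + 1) x + (if j = j0 then 1 else 0) := by
      intro j h0 h1
      unfold cntZ
      rw [hL1, PySem.List.pyRange_one_succ_right (by omega), List.countP_append]
      congr 1
      simp only [List.countP_cons, List.countP_nil, Nat.zero_add]
      by_cases hj : j = j0
      · rw [if_pos hj, if_pos (decide_eq_true ((hkey j h0 h1).mpr hj))]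
      · rw [if_neg hj, if_neg (by
          simp only [decide_eq_true_eq]
          exact fun hc => hj ((hkey j h0 h1).mp hc))]
    have hmapeq : ∀ j ∈ PySem.List.pyRange 0 x 1,
        ((((cntZ lo (lo + ((L + 1 : Nat) : Int)) (j + 1) x).choose 2 : Nat)) : Int)
          = ((((cntZ lo (lo + (L:Nat)) (j + 1) x).choose 2 : Nat)) : Int)
            + (if j = j0 then ((L / x.toNat : Nat) : Int) else 0) := by
      intro j hj
      have hj' := PySem.List.mem_pyRange_one.mp hj
      rw [hsplit j hj'.1 hj'.2]
      by_cases hjj : j = j0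
      · rw [if_pos hjj, if_pos hjj]
        have hdd : x ∣ (lo + (L:Nat)) - (j + 1) := (hkey j hj'.1 hj'.2).mpr hjj
        have hdd' : x ∣ (j + 1) - (lo + (L:Nat)) := by
          have hneg := dvd_neg.mpr hdd
          rwa [neg_sub] at hneg
        have hcnt : cntZ lo (lo + (L:Nat)) (j + 1) x = L / x.toNat := by
          rw [cntZ_congr_mod hdd', cntZ_top hx L lo]
        rw [hcnt, choose2_succ]
        push_cast
        ring
      · rw [if_neg hjj, if_neg hjj, Nat.add_zero, add_zero]
    rw [List.map_congr_left hmapeq, PySem.List.sum_map_add_int, ih,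
      sum_ite_single (PySem.List.nodup_pyRange_one 0 x) j0,
      if_pos (PySem.List.mem_pyRange_one.mpr ⟨hj00, hj0x⟩)]
    have hg : gN (L + 1) x.toNat = gN L x.toNat + L / x.toNat := by
      unfold gN
      rw [List.range_succ, List.map_append, List.sum_append]
      simp
    rw [hg]
    push_cast
    ring

theorem nat_succ_mod (X L : Nat) (h : ¬ X ∣ (L + 1)) : (L + 1) % X = L % X + 1 := by
  have h1 : (L + 1) / X = L / X := by rw [Nat.succ_div]; simp [h]
  have h2 := Nat.div_add_mod (L + 1) X
  have h3 := Nat.div_add_mod L X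
  rw [h1] at h2
  generalize X * (L / X) = t at h2 h3
  omega

theorem gN_closed (L X : Nat) (hX : 0 < X) :
    gN L X = X * ((L / X).choose 2) + (L % X) * (L / X) := by
  induction L with
  | zero => simp [gN]
  | succ L ih =>
    have hstep : gN (L + 1) X = gN L X + L / X := by
      unfold gN
      rw [List.range_succ, List.map_append, List.sum_append]
      simp
    rw [hstep, ih]
    by_cases h : X ∣ (L + 1)
    · have h1 : (L + 1) / X = L / X + 1 := by rw [Nat.succ_div]; simp [h]
      have h2 : (L + 1) % X = 0 := by obtain ⟨c, hc⟩ := h; rw [hc]; exact Nat.mul_mod_right X c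
      have e1 := Nat.div_add_mod (L + 1) X
      have e2 := Nat.div_add_mod L X
      rw [h1, h2, Nat.mul_succ] at e1
      have h3 : L % X = X - 1 := by
        generalize X * (L / X) = t at e1 e2
        omega
      rw [h1, h2, h3]
      rw [Nat.choose_succ_succ (L / X) 1, Nat.choose_one_right]
      have hle : L / X ≤ X * (L / X) := Nat.le_mul_of_pos_left _ hX
      rw [Nat.mul_add, Nat.sub_mul, one_mul]
      simp only [show Nat.succ 1 = 2 from rfl]
      omega
    · have h1 : (L + 1) / X = L / X := by rw [Nat.succ_div]; simp [h]
      have h2 : (L + 1) % X = L % X + 1 := nat_succ_mod X L h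
      rw [h1, h2, Nat.add_mul, one_mul]
      omega

theorem nat_f_id (X S M : Nat) (hS : S ≤ X) :
    S * (M * (M + 1)) / 2 + (X - S) * (M * (M - 1)) / 2 = X * M.choose 2 + S * M := by
  have hd1 : 2 ∣ M * (M + 1) := (Nat.even_mul_succ_self M).two_dvd
  have hd2 : 2 ∣ M * (M - 1) := by
    rcases M with _ | m
    · simp
    · simpa [Nat.succ_sub_one, mul_comm] using (Nat.even_mul_succ_self m).two_dvd
  rw [Nat.mul_div_assoc S hd1, Nat.mul_div_assoc (X - S) hd2]
  have hA : (M + 1).choose 2 = (M + 1) * M / 2 := by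
    rw [Nat.choose_two_right]
    simp
  have hc1 : M * (M + 1) / 2 = M.choose 2 + M := by
    rw [mul_comm, ← hA, choose2_succ]
  have hc2 : M * (M - 1) / 2 = M.choose 2 := by
    rw [Nat.choose_two_right]
  rw [hc1, hc2, Nat.mul_add, Nat.sub_mul]
  have hle : S * M.choose 2 ≤ X * M.choose 2 := Nat.mul_le_mul_right _ hS
  omega

theorem f_eq (x L : Int) (hx : 0 < x) (hL : 0 ≤ L) :
    PySem.Int.floordiv ((PySem.Int.mod L x) * (PySem.Int.floordiv L x) * (PySem.Int.floordiv L x + 1)) 2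
      + PySem.Int.floordiv ((x - PySem.Int.mod L x) * (PySem.Int.floordiv L x) * (PySem.Int.floordiv L x - 1)) 2
      = ((gN L.toNat x.toNat : Nat) : Int) := by
  have hxc : ((x.toNat : Int)) = x := Int.toNat_of_nonneg hx.le
  have hLc : ((L.toNat : Int)) = L := Int.toNat_of_nonneg hL
  have hM : PySem.Int.floordiv L x = ((L.toNat / x.toNat : Nat) : Int) := by
    conv_lhs => rw [← hLc, ← hxc]
    exact PySem.Int.floordiv_natCast _ _
  have hS : PySem.Int.mod L x = ((L.toNat % x.toNat : Nat) : Int) := by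
    conv_lhs => rw [← hLc, ← hxc]
    exact PySem.Int.mod_natCast _ _
  have hSX : L.toNat % x.toNat ≤ x.toNat := (Nat.mod_lt _ (by omega)).le
  rw [hM, hS]
  by_cases hM0 : L.toNat / x.toNat = 0
  · rw [hM0]
    rw [gN_closed _ _ (by omega), hM0]
    simp
  · have hM1 : 1 ≤ L.toNat / x.toNat := Nat.one_le_iff_ne_zero.mpr hM0
    have e1 : ((L.toNat % x.toNat : Nat) : Int) * ((L.toNat / x.toNat : Nat) : Int)
        * (((L.toNat / x.toNat : Nat) : Int) + 1)
        = (((L.toNat % x.toNat) * ((L.toNat / x.toNat) * (L.toNat / x.toNat + 1)) : Nat) : Int) := by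
      push_cast
      ring
    have e2 : (x - ((L.toNat % x.toNat : Nat) : Int)) * ((L.toNat / x.toNat : Nat) : Int)
        * (((L.toNat / x.toNat : Nat) : Int) - 1)
        = (((x.toNat - L.toNat % x.toNat) * ((L.toNat / x.toNat) * (L.toNat / x.toNat - 1)) : Nat) : Int) := by
      push_cast [hSX, hM1]
      rw [hxc]
      ring
    rw [e1, e2, show (2:Int) = ((2:Nat):Int) from rfl, PySem.Int.floordiv_natCast,
      PySem.Int.floordiv_natCast, ← Nat.cast_add, gN_closed _ _ (by omega)]
    norm_cast
    exact nat_f_id x.toNat (L.toNat % x.toNat) (L.toNat / x.toNat) hSX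



theorem block_sum (n k x i : Int) (hx : 0 < x) (_hxn : x ≤ n) (hk : 0 < k) (hi : 0 ≤ i)
    (hin : i ≤ n) :
    ((PySem.List.pyRange 0 x 1).map
        (fun j => (pvN (PySem.List.pyRange (1 + i) (min (n + 1) (1 + i + k)) 1)
          (PySem.List.pyRange (j + 1) (n + 1) x) : Int))).sum
      = ((gN ((min (n + 1) (1 + i + k) - (1 + i)).toNat) x.toNat : Nat) : Int) := by
  have hlohi : min (n + 1) (1 + i + k)
      = (1 + i) + (((min (n + 1) (1 + i + k) - (1 + i)).toNat : Nat) : Int) := by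
    omega
  have hmapc : ∀ j ∈ PySem.List.pyRange 0 x 1,
      ((pvN (PySem.List.pyRange (1 + i) (min (n + 1) (1 + i + k)) 1)
          (PySem.List.pyRange (j + 1) (n + 1) x) : Nat) : Int)
        = ((((cntZ (1 + i) ((1 + i) + ((min (n + 1) (1 + i + k) - (1 + i)).toNat : Nat))
            (j + 1) x).choose 2 : Nat)) : Int) := by
    intro j hj
    have hj' := PySem.List.mem_pyRange_one.mp hj
    rw [pvN_eq_choose (pairwise_pyRange_pos one_pos (1 + i) (min (n + 1) (1 + i + k)))
      (pairwise_pyRange_pos hx (j + 1) (n + 1))]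
    rw [filter_mem_c n x (1 + i) (min (n + 1) (1 + i + k)) j hx (by omega) (by omega) hj'.1 hj'.2]
    rw [← hlohi]
  rw [List.map_congr_left hmapc, S_eq_g x hx _ (1 + i)]


theorem solution_spec : Claim_equal_solution := by
  unfold Claim_equal_solution
  intro n k hdom hpre
  unfold Pre_solution at hpre
  unfold Spec_solution
  rw [sol_eq_sum]
  by_cases hmain : 0 < n ∧ 0 < k ∧ 0 < PySem.Int.floordiv n k
  · obtain ⟨hn, hk, hx⟩ := hmain
    have hdm : PySem.Int.floordiv n k * k + PySem.Int.mod n k = n := PySem.Int.floordiv_mul_add_mod n k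
    have hr0 : 0 ≤ PySem.Int.mod n k := PySem.Int.mod_nonneg n hk
    have hrk : PySem.Int.mod n k < k := PySem.Int.mod_lt n hk
    have hxk : PySem.Int.floordiv n k ≤ PySem.Int.floordiv n k * k := le_mul_of_one_le_right hx.le hk
    have hxn : PySem.Int.floordiv n k ≤ n := by omega
    have hc : (PySem.List.pyRange 0 (PySem.Int.floordiv n k) 1).map (fun j =>
          (PySem.List.slice? (PySem.List.pyRange 1 (n + 1) 1) (some j) (some n) (PySem.Int.floordiv n k)).getD [])
        = (PySem.List.pyRange 0 (PySem.Int.floordiv n k) 1).map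
            (fun j => PySem.List.pyRange (j + 1) (n + 1) (PySem.Int.floordiv n k)) :=
      List.map_congr_left (fun j hj => by
        have hj' := PySem.List.mem_pyRange_one.mp hj
        exact c_eq n (PySem.Int.floordiv n k) j hx hxn hj'.1 hj'.2)
    simp only [hc]
    rw [PySem.List.pyRange_of_pos 0 n hk, if_pos (show (0:Int) < n from hn)]
    simp only [List.map_map, Function.comp_def, zero_add]
    have hT0 : 0 ≤ (n - 0 + k - 1) / k := Int.ediv_nonneg (by omega) (by omega)
    have hstep : ∀ t ∈ List.range ((n - 0 + k - 1) / k).toNat,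
        ((PySem.List.pyRange 0 (PySem.Int.floordiv n k) 1).map
            (fun j => (pvN (PySem.List.slice (PySem.List.pyRange 1 (n + 1) 1)
                (some (k * (t:Int))) (some (k * (t:Int) + k)))
              (PySem.List.pyRange (j + 1) (n + 1) (PySem.Int.floordiv n k)) : Int))).sum
          = ((gN ((min (n + 1) (1 + k * (t:Int) + k) - (1 + k * (t:Int))).toNat)
              (PySem.Int.floordiv n k).toNat : Nat) : Int) := by
      intro t ht
      have htT := List.mem_range.mp ht
      have hi0 : (0:Int) ≤ k * t := by positivity
      have h1 : ((t:Int) + 1) ≤ (n - 0 + k - 1) / k := by omega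
      have h2 := (Int.le_ediv_iff_mul_le hk).mp h1
      rw [add_mul, one_mul, mul_comm] at h2
      have hiT : k * (t:Int) ≤ n - 1 := by omega
      simp only [block_eq n k (k * (t:Int)) hi0 hk]
      exact block_sum n k (PySem.Int.floordiv n k) (k * (t:Int)) hx hxn hk hi0 (by omega)
    rw [List.map_congr_left hstep]
    have hxc : (((PySem.Int.floordiv n k).toNat : Nat) : Int) = PySem.Int.floordiv n k :=
      Int.toNat_of_nonneg hx.le
    have halt : solution_alt n k
        = PySem.Int.floordiv n k * ((gN k.toNat (PySem.Int.floordiv n k).toNat : Nat) : Int)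
          + ((gN (PySem.Int.mod n k).toNat (PySem.Int.floordiv n k).toNat : Nat) : Int) := by
      simp only [solution_alt]
      rw [if_neg (by omega : ¬ (n ≤ 0 ∨ k ≤ 0 ∨ PySem.Int.floordiv n k ≤ 0))]
      rw [f_eq (PySem.Int.floordiv n k) k hx hk.le,
        f_eq (PySem.Int.floordiv n k) (PySem.Int.mod n k) hx hr0]
    rw [halt]
    have hTeq : ((n - 0 + k - 1) / k).toNat
        = (if PySem.Int.mod n k = 0 then (PySem.Int.floordiv n k).toNat
           else (PySem.Int.floordiv n k).toNat + 1) := by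
      have hsplit : n - 0 + k - 1 = (PySem.Int.mod n k + k - 1) + PySem.Int.floordiv n k * k := by
        omega
      rw [hsplit, Int.add_mul_ediv_right _ _ (by omega : k ≠ 0)]
      by_cases hr : PySem.Int.mod n k = 0
      · rw [if_pos hr, hr, show (0:Int) + k - 1 = k - 1 by ring,
          Int.ediv_eq_zero_of_lt (by omega) (by omega)]
        omega
      · rw [if_neg hr, show PySem.Int.mod n k + k - 1 = (PySem.Int.mod n k - 1) + 1 * k by ring,
          Int.add_mul_ediv_right _ _ (by omega : k ≠ 0),
          Int.ediv_eq_zero_of_lt (by omega) (by omega)]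
        omega
    rw [hTeq]
    have hconst : ∀ t ∈ List.range (PySem.Int.floordiv n k).toNat,
        ((gN ((min (n + 1) (1 + k * (t:Int) + k) - (1 + k * (t:Int))).toNat)
            (PySem.Int.floordiv n k).toNat : Nat) : Int)
          = ((gN k.toNat (PySem.Int.floordiv n k).toNat : Nat) : Int) := by
      intro t ht
      have htX := List.mem_range.mp ht
      have ht1 : ((t:Int) + 1) ≤ PySem.Int.floordiv n k := by omega
      have hmul : k * ((t:Int) + 1) ≤ k * PySem.Int.floordiv n k :=
        mul_le_mul_of_nonneg_left ht1 hk.le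
      have hmul2 : k * PySem.Int.floordiv n k ≤ n := by
        rw [mul_comm]
        omega
      have hmul3 : k * ((t:Int) + 1) = k * (t:Int) + k := by ring
      have harg : (min (n + 1) (1 + k * (t:Int) + k) - (1 + k * (t:Int))).toNat = k.toNat := by
        omega
      rw [harg]
    by_cases hr : PySem.Int.mod n k = 0
    · rw [if_pos hr, List.map_congr_left hconst, PySem.List.sum_map_const_int, List.length_range,
        hr, hxc]
      simp [gN]
    · rw [if_neg hr, List.range_succ, List.map_append, List.sum_append,
        List.map_congr_left hconst, PySem.List.sum_map_const_int, List.length_range]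
      have hlast : ((gN ((min (n + 1) (1 + k * (((PySem.Int.floordiv n k).toNat : Nat) : Int) + k)
            - (1 + k * (((PySem.Int.floordiv n k).toNat : Nat) : Int))).toNat)
            (PySem.Int.floordiv n k).toNat : Nat) : Int)
          = ((gN (PySem.Int.mod n k).toNat (PySem.Int.floordiv n k).toNat : Nat) : Int) := by
        have hkx : k * PySem.Int.floordiv n k = n - PySem.Int.mod n k := by
          rw [mul_comm]
          omega
        rw [hxc]
        have harg : (min (n + 1) (1 + k * PySem.Int.floordiv n k + k)
            - (1 + k * PySem.Int.floordiv n k)).toNat = (PySem.Int.mod n k).toNat := by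
          omega
        rw [harg]
      rw [List.map_cons, List.map_nil, List.sum_cons, List.sum_nil, hlast, hxc]
      ring
  · have hguard : n ≤ 0 ∨ k ≤ 0 ∨ PySem.Int.floordiv n k ≤ 0 := by
      by_contra hcon
      push_neg at hcon
      exact hmain ⟨by omega, by omega, by omega⟩
    have halt : solution_alt n k = 0 := by
      simp only [solution_alt]
      rw [if_pos hguard]
    rw [halt]
    rcases le_or_gt (PySem.Int.floordiv n k) 0 with hx0 | hx0
    · rw [PySem.List.pyRange_one_eq_nil hx0]
      simp only [List.map_nil, List.sum_nil]
      apply List.sum_eq_zero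
      intro v hv
      obtain ⟨B, _, rfl⟩ := List.mem_map.mp hv
      rfl
    · have hn0 : n ≤ 0 := by
        by_contra hn
        push_neg at hn
        have hk0 : k < 0 := by
          rcases lt_trichotomy k 0 with h | h | h
          · exact h
          · exact absurd h hpre
          · exact absurd ⟨hn, h, hx0⟩ hmain
        have hmod := PySem.Int.mod_neg_bounds n hk0
        have hdm := PySem.Int.floordiv_mul_add_mod n k
        have hneg : PySem.Int.floordiv n k * k < 0 := mul_neg_of_pos_of_neg hx0 hk0
        omega
      rw [PySem.List.pyRange_one_eq_nil (show n + 1 ≤ 1 by omega)]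
      apply List.sum_eq_zero
      intro v hv
      obtain ⟨B, hB, rfl⟩ := List.mem_map.mp hv
      obtain ⟨i, _, rfl⟩ := List.mem_map.mp hB
      have hsl : PySem.List.slice ([] : List Int) (some i) (some (i + k)) = [] := by
        apply List.eq_nil_iff_forall_not_mem.mpr
        intro y hy
        have hmem := PySem.List.mem_of_mem_slice _ _ _ hy
        simp at hmem
      rw [hsl]
      apply List.sum_eq_zero
      intro w hw
      obtain ⟨C, hC, rfl⟩ := List.mem_map.mp hw
      have hz : pvN [] C = 0 := by
        unfold pvN
        rw [show (2:Nat) = 1 + 1 from rfl, PySem.List.combinations_nil_succ]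
        rfl
      rw [hz]
      rfl

-- ===== VERDICT (by name: the statement is the Claim_ definition above) =====
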